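-- pv_equiv track=rewrite | github.com/LuanSena14/MeuSite | migrate_db.py | topo_sort_rows
-- ===== SOURCE A (Python) =====
-- def topo_sort_rows(rows: list, col_names: list) -> list:
--     """Ordena linhas de tabela auto-referenciada (cd_pai → id) em ordem topológica."""
--     id_idx   = col_names.index("id")
--     pai_idx  = col_names.index("cd_pai")
--     by_id    = {r[id_idx]: r for r in rows}
--     visited  = set()
--     result   = []
--
--     def visit(row):
--         rid = row[id_idx]
--         if rid in visited:
--             return
--         visited.add(rid)
--         pai = row[pai_idx]
--         if pai is not None and pai in by_id:
--             visit(by_id[pai])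
--         result.append(row)
--
--     for r in rows:
--         visit(r)
--     return result
-- ===== SOURCE B (Python) =====
-- def topo_sort_rows(rows: list, col_names: list) -> list:
--     """Iterative DFS with an explicit work stack of (row, expanded) entries."""
--     id_idx = col_names.index("id")
--     pai_idx = col_names.index("cd_pai")
--     by_id = {r[id_idx]: r for r in rows}
--     visited = set()
--     result = []
--     for start in rows:
--         stack = [(start, False)]
--         while stack:
--             row, expanded = stack.pop()
--             if expanded:
--                 result.append(row)
--                 continue
--             rid = row[id_idx]
--             if rid in visited:
--                 continue
--             visited.add(rid)
--             stack.append((row, True))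
--             pai = row[pai_idx]
--             if pai is not None and pai in by_id:
--                 stack.append((by_id[pai], False))
--     return result
-- ===== Notes on version B (the rewrite author's own statement) =====
-- stated objective: alternative
-- what changed: Replaced A's recursive visit helper with an iterative depth-first search driven by an explicit work stack of (row, expanded) entries, the classic two-phase stack encoding of post-order DFS.
import Mathlib
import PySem

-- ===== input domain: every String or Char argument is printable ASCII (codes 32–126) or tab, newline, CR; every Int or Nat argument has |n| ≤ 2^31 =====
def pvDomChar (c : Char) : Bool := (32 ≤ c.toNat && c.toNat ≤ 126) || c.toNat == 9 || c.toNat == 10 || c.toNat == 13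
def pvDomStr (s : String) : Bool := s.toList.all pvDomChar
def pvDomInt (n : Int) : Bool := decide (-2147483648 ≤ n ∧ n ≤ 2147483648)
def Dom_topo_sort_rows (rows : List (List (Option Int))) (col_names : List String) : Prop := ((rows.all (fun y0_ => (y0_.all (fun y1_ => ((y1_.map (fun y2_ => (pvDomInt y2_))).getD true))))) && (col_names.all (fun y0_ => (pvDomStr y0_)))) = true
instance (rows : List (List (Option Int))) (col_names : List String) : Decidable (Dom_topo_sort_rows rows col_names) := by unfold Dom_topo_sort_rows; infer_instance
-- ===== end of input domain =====

-- B replaces A's recursive `visit` helper with an explicit-stack iterative DFS over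
-- (row, expanded) entries; same return value, same O(n) traversal (objective: alternative).


-- ===== PORT A =====
-- Python r[i] for a Nat index i (exact when i < r.length; Pre_ guarantees that).
def pvGetCell (r : List (Option Int)) (i : Nat) : Option Int := (r[i]?).getD none

-- A's recursive `visit`, with fuel for termination (fuel = rows.length + 1 is never exhausted:
-- each recursive call adds a fresh id to `visited`, and ids come from the rows).
def pvVisitA (id_idx pai_idx : Nat) (by_id : PySem.Dict (Option Int) (List (Option Int)))
    (fuel : Nat) (st : PySem.Set (Option Int) × List (List (Option Int)))
    (row : List (Option Int)) : PySem.Set (Option Int) × List (List (Option Int)) :=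
  match fuel with
  | 0 => st
  | fuel + 1 =>
    let rid := pvGetCell row id_idx
    if PySem.Set.contains st.1 rid then st
    else
      let visited := PySem.Set.add st.1 rid
      match pvGetCell row pai_idx, by_id.get? (pvGetCell row pai_idx) with
      | some _, some parent =>
        let st' := pvVisitA id_idx pai_idx by_id fuel (visited, st.2) parent
        (st'.1, st'.2 ++ [row])
      | _, _ => (visited, st.2 ++ [row])

def topo_sort_rows (rows : List (List (Option Int))) (col_names : List String) : List (List (Option Int)) :=
  match PySem.List.index? col_names "id", PySem.List.index? col_names "cd_pai" with
  | some id_idx, some pai_idx =>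
    let by_id := rows.foldl (fun d r => d.insert (pvGetCell r id_idx) r) PySem.Dict.empty
    (rows.foldl (fun st r => pvVisitA id_idx pai_idx by_id (rows.length + 1) st r)
      (PySem.Set.empty, [])).2
  | _, _ => []  -- Python raises ValueError here; excluded by Pre_

-- ===== PORT B =====
-- B's `while stack:` loop as a small stack machine over (row, expanded) entries.
-- Fuel is a termination artifact only: it is spent on the `expanded = False` pops
-- (the only ones that can grow the stack) and never runs out on real inputs; the
-- other steps shrink the stack, whence the lexicographic measure (fuel, |stack|).
def pvRunB (id_idx pai_idx : Nat) (by_id : PySem.Dict (Option Int) (List (Option Int))) :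
    Nat → PySem.Set (Option Int) × List (List (Option Int)) →
    List (List (Option Int) × Bool) → PySem.Set (Option Int) × List (List (Option Int))
  | _, st, [] => st
  | fuel, st, (row, true) :: stk =>
    pvRunB id_idx pai_idx by_id fuel (st.1, st.2 ++ [row]) stk
  | 0, st, (_, false) :: stk => pvRunB id_idx pai_idx by_id 0 st stk
  | fuel + 1, st, (row, false) :: stk =>
    if PySem.Set.contains st.1 (pvGetCell row id_idx) then
      pvRunB id_idx pai_idx by_id fuel st stk
    else
      match pvGetCell row pai_idx, by_id.get? (pvGetCell row pai_idx) with
      | some _, some parent =>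
        pvRunB id_idx pai_idx by_id fuel (PySem.Set.add st.1 (pvGetCell row id_idx), st.2)
          ((parent, false) :: (row, true) :: stk)
      | _, _ =>
        pvRunB id_idx pai_idx by_id fuel (PySem.Set.add st.1 (pvGetCell row id_idx), st.2)
          ((row, true) :: stk)
termination_by fuel _ stk => (fuel, stk.length)

def topo_sort_rows_alt (rows : List (List (Option Int))) (col_names : List String) : List (List (Option Int)) :=
  match PySem.List.index? col_names "id", PySem.List.index? col_names "cd_pai" with
  | some id_idx, some pai_idx =>
    let by_id := rows.foldl (fun d r => d.insert (pvGetCell r id_idx) r) PySem.Dict.empty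
    (rows.foldl (fun st start =>
        pvRunB id_idx pai_idx by_id (rows.length + 1) st [(start, false)])
      (PySem.Set.empty, [])).2
  | _, _ => []  -- Python raises ValueError here; excluded by Pre_

-- ===== PRECONDITION & SPEC =====
-- Pre_ excludes exactly the inputs where Python A raises: a missing "id"/"cd_pai" column
-- (ValueError from list.index) or a row too short for either column index (IndexError).
def Pre_topo_sort_rows (rows : List (List (Option Int))) (col_names : List String) : Prop :=
  (PySem.List.index? col_names "id").isSome ∧ (PySem.List.index? col_names "cd_pai").isSome ∧
  ∀ r ∈ rows, (PySem.List.index? col_names "id").getD 0 < r.length ∧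
              (PySem.List.index? col_names "cd_pai").getD 0 < r.length
instance (rows : List (List (Option Int))) (col_names : List String) : Decidable (Pre_topo_sort_rows rows col_names) := by unfold Pre_topo_sort_rows; infer_instance

def pvWitness_topo_sort_rows : List (List (Option Int)) × List String :=
  ([[some 1, none], [some 2, some 1], [some 3, some 2]], ["id", "cd_pai"])

def Spec_topo_sort_rows (rows : List (List (Option Int))) (col_names : List String) (out : List (List (Option Int))) : Prop := out = topo_sort_rows_alt rows col_names
instance (rows : List (List (Option Int))) (col_names : List String) (out : List (List (Option Int))) : Decidable (Spec_topo_sort_rows rows col_names out) := by unfold Spec_topo_sort_rows; infer_instance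

-- ===== CLAIM (what is proved, stated in full; the proofs are below) =====
def Claim_equal_topo_sort_rows : Prop := ∀ (rows : List (List (Option Int))) (col_names : List String), Dom_topo_sort_rows rows col_names → Pre_topo_sort_rows rows col_names → Spec_topo_sort_rows rows col_names (topo_sort_rows rows col_names)

-- ===== LEMMAS AND PROOFS =====

-- Pushing (row, false) and running the machine is running A's `visit` on row and then
-- continuing with the rest of the stack (with some leftover fuel f' ≤ f).
theorem pvRunB_false (id_idx pai_idx : Nat) (by_id : PySem.Dict (Option Int) (List (Option Int)))
    (f : Nat) (st : PySem.Set (Option Int) × List (List (Option Int)))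
    (row : List (Option Int)) (stk : List (List (Option Int) × Bool)) :
    ∃ f', f' ≤ f ∧
      pvRunB id_idx pai_idx by_id f st ((row, false) :: stk) =
        pvRunB id_idx pai_idx by_id f' (pvVisitA id_idx pai_idx by_id f st row) stk := by
  induction f generalizing st row stk with
  | zero => exact ⟨0, le_refl 0, by simp [pvRunB, pvVisitA]⟩
  | succ n ih =>
    by_cases hb : pvGetCell row id_idx ∈ st.1
    · exact ⟨n, Nat.le_succ n, by simp [pvRunB, pvVisitA, hb]⟩
    · rcases hp : pvGetCell row pai_idx with _ | p
      · exact ⟨n, Nat.le_succ n, by simp [pvRunB, pvVisitA, hb, hp]⟩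
      · rcases hq : by_id.get? (some p) with _ | parent
        · exact ⟨n, Nat.le_succ n, by simp [pvRunB, pvVisitA, hb, hp, hq]⟩
        · obtain ⟨f', hle, heq⟩ :=
            ih (PySem.Set.add st.1 (pvGetCell row id_idx), st.2) parent ((row, true) :: stk)
          refine ⟨f', Nat.le_succ_of_le hle, ?_⟩
          simp only [pvRunB, pvVisitA, hp, hq]
          rw [heq]
          simp [pvRunB, hb]

-- Per-root corollary: the machine started on a singleton stack computes A's visit.
theorem pvRunB_single (id_idx pai_idx : Nat) (by_id : PySem.Dict (Option Int) (List (Option Int)))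
    (f : Nat) (st : PySem.Set (Option Int) × List (List (Option Int)))
    (row : List (Option Int)) :
    pvRunB id_idx pai_idx by_id f st [(row, false)] =
      pvVisitA id_idx pai_idx by_id f st row := by
  obtain ⟨f', _, heq⟩ := pvRunB_false id_idx pai_idx by_id f st row []
  rw [heq]; simp [pvRunB]

theorem topo_sort_rows_spec : Claim_equal_topo_sort_rows := by
  intro rows col_names _ hpre
  unfold Spec_topo_sort_rows topo_sort_rows topo_sort_rows_alt
  obtain ⟨h1, h2, _⟩ := hpre
  obtain ⟨i, hi⟩ := Option.isSome_iff_exists.mp h1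
  obtain ⟨j, hj⟩ := Option.isSome_iff_exists.mp h2
  rw [hi, hj]
  simp only
  have hstep :
      (fun (st : PySem.Set (Option Int) × List (List (Option Int))) r =>
        pvVisitA i j (rows.foldl (fun d r => d.insert (pvGetCell r i) r) PySem.Dict.empty)
          (rows.length + 1) st r) =
      (fun st start =>
        pvRunB i j (rows.foldl (fun d r => d.insert (pvGetCell r i) r) PySem.Dict.empty)
          (rows.length + 1) st [(start, false)]) := by
    funext st r
    rw [pvRunB_single]
  rw [hstep]
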